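-- pv_equiv track=rewrite | github.com/CurvatureX/agent_team_monorepo | apps/backend/workflow_agent/core/design_engine.py | _analyze_performance_considerations
-- ===== SOURCE A (Python) =====
-- from typing import Any, Dict, List
--
-- def _analyze_performance_considerations(nodes: List[Dict[str, Any]]) -> List[str]:
--     """Analyze performance considerations"""
--     considerations = []
--
--     # Check for AI nodes
--     ai_nodes = [n for n in nodes if "AI_" in n.get("type", "")]
--     if len(ai_nodes) > 1:
--         considerations.append("多个AI节点可能导致延迟累积，考虑并行处理")
--
--     # Check for external integrations
--     external_nodes = [n for n in nodes if "EXTERNAL_" in n.get("type", "")]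
--     if len(external_nodes) > 2:
--         considerations.append("多个外部集成可能导致网络延迟，考虑连接池和缓存")
--
--     # Check for memory operations
--     memory_nodes = [n for n in nodes if "MEMORY_" in n.get("type", "")]
--     if len(memory_nodes) > 0:
--         considerations.append("内存操作需要考虑数据量大小和检索效率")
--
--     return considerations
-- ===== SOURCE B (Python) =====
-- from typing import Any, Dict, List
--
-- _RULES = (
--     ("AI_", 1, "多个AI节点可能导致延迟累积，考虑并行处理"),
--     ("EXTERNAL_", 2, "多个外部集成可能导致网络延迟，考虑连接池和缓存"),
--     ("MEMORY_", 0, "内存操作需要考虑数据量大小和检索效率"),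
-- )
--
-- def _analyze_performance_considerations(nodes: List[Dict[str, Any]]) -> List[str]:
--     """Analyze performance considerations (count table + rule pass)."""
--     counts = {}
--     for n in nodes:
--         t = n.get("type", "")
--         for key, _, _ in _RULES:
--             if key in t:
--                 counts[key] = counts.get(key, 0) + 1
--     out = []
--     for key, threshold, msg in _RULES:
--         if counts.get(key, 0) > threshold:
--             out.append(msg)
--     return out
-- ===== Notes on version B (the rewrite author's own statement) =====
-- stated objective: alternative
-- what changed: B makes a single pass over the nodes, extracting each node's type once and incrementing a prefix-count table, then drives the output from a fixed (key, threshold, message) rule table, instead of A's three separate list-comprehension scans with inline if/append blocks.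
import Mathlib
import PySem

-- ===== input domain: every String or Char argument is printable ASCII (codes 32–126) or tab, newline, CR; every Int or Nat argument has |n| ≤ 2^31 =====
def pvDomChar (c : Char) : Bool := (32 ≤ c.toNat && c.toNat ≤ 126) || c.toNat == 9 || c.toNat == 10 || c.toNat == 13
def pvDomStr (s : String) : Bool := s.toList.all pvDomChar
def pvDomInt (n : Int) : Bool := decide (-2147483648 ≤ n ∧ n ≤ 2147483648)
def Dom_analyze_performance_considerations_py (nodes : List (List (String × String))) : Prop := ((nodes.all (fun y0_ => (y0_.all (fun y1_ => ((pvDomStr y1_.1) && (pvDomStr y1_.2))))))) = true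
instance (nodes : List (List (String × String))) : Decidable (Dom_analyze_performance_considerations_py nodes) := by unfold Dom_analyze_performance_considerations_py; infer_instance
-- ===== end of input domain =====

-- B replaces A's three comprehension scans by one counting pass plus a rule-table pass; same results, different decomposition.

-- ===== PORT A =====
def analyze_performance_considerations_py (nodes : List (List (String × String))) : List String :=
  let considerations : List String := []
  let ai_nodes := nodes.filter (fun n => PySem.Str.isIn "AI_" ((PySem.Dict.mk n).getD "type" ""))
  let considerations := if ai_nodes.length > 1 then considerations ++ ["多个AI节点可能导致延迟累积，考虑并行处理"] else considerations
  let external_nodes := nodes.filter (fun n => PySem.Str.isIn "EXTERNAL_" ((PySem.Dict.mk n).getD "type" ""))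
  let considerations := if external_nodes.length > 2 then considerations ++ ["多个外部集成可能导致网络延迟，考虑连接池和缓存"] else considerations
  let memory_nodes := nodes.filter (fun n => PySem.Str.isIn "MEMORY_" ((PySem.Dict.mk n).getD "type" ""))
  let considerations := if memory_nodes.length > 0 then considerations ++ ["内存操作需要考虑数据量大小和检索效率"] else considerations
  considerations

-- ===== PORT B =====
-- _RULES from Source B
def pvRules : List (String × Int × String) :=
  [("AI_", 1, "多个AI节点可能导致延迟累积，考虑并行处理"),
   ("EXTERNAL_", 2, "多个外部集成可能导致网络延迟，考虑连接池和缓存"),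
   ("MEMORY_", 0, "内存操作需要考虑数据量大小和检索效率")]

def analyze_performance_considerations_py_alt (nodes : List (List (String × String))) : List String :=
  let counts : PySem.Dict String Int :=
    nodes.foldl (fun d n =>
      let t := (PySem.Dict.mk n).getD "type" ""
      pvRules.foldl (fun d r =>
        if PySem.Str.isIn r.1 t then d.insert r.1 (d.getD r.1 0 + 1) else d) d)
      PySem.Dict.empty
  pvRules.foldl (fun out r =>
    if counts.getD r.1 0 > r.2.1 then out ++ [r.2.2] else out) []

-- ===== PRECONDITION & SPEC =====
def Spec_analyze_performance_considerations_py (nodes : List (List (String × String))) (out : List String) : Prop := out = analyze_performance_considerations_py_alt nodes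
instance (nodes : List (List (String × String))) (out : List String) : Decidable (Spec_analyze_performance_considerations_py nodes out) := by unfold Spec_analyze_performance_considerations_py; infer_instance

-- ===== CLAIM (what is proved, stated in full; the proofs are below) =====
def Claim_equal_analyze_performance_considerations_py : Prop := ∀ (nodes : List (List (String × String))), Dom_analyze_performance_considerations_py nodes → Spec_analyze_performance_considerations_py nodes (analyze_performance_considerations_py nodes)

-- ===== LEMMAS AND PROOFS =====

-- the per-node counting step of B
def pvStep (d : PySem.Dict String Int) (n : List (String × String)) : PySem.Dict String Int :=
  let t := (PySem.Dict.mk n).getD "type" ""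
  pvRules.foldl (fun d r =>
    if PySem.Str.isIn r.1 t then d.insert r.1 (d.getD r.1 0 + 1) else d) d

def pvP (key : String) (n : List (String × String)) : Bool :=
  PySem.Str.isIn key ((PySem.Dict.mk n).getD "type" "")

lemma pvStep_getD (d : PySem.Dict String Int) (n : List (String × String)) (k : String)
    (hk : k = "AI_" ∨ k = "EXTERNAL_" ∨ k = "MEMORY_") :
    (pvStep d n).getD k 0 = d.getD k 0 + (if pvP k n then 1 else 0) := by
  simp only [pvStep, pvRules, pvP, List.foldl]
  rcases hk with h | h | h <;> subst h <;>
    split_ifs <;> simp_all [PySem.Dict.getD_insert]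

lemma pvCounts_getD (nodes : List (List (String × String))) (d : PySem.Dict String Int)
    (k : String) (hk : k = "AI_" ∨ k = "EXTERNAL_" ∨ k = "MEMORY_") :
    (nodes.foldl pvStep d).getD k 0 = d.getD k 0 + (nodes.countP (pvP k) : Int) := by
  induction nodes generalizing d with
  | nil => simp
  | cons n ns ih =>
      simp only [List.foldl_cons, ih, pvStep_getD d n k hk, List.countP_cons]
      split_ifs <;> push_cast <;> ring

theorem analyze_performance_considerations_py_spec' (nodes : List (List (String × String))) :
    analyze_performance_considerations_py nodes = analyze_performance_considerations_py_alt nodes := by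
  have hA : (nodes.foldl pvStep PySem.Dict.empty).getD "AI_" 0
      = ((nodes.filter (pvP "AI_")).length : Int) := by
    rw [pvCounts_getD nodes PySem.Dict.empty "AI_" (Or.inl rfl), List.countP_eq_length_filter]
    simp
  have hE : (nodes.foldl pvStep PySem.Dict.empty).getD "EXTERNAL_" 0
      = ((nodes.filter (pvP "EXTERNAL_")).length : Int) := by
    rw [pvCounts_getD nodes PySem.Dict.empty "EXTERNAL_" (Or.inr (Or.inl rfl)), List.countP_eq_length_filter]
    simp
  have hM : (nodes.foldl pvStep PySem.Dict.empty).getD "MEMORY_" 0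
      = ((nodes.filter (pvP "MEMORY_")).length : Int) := by
    rw [pvCounts_getD nodes PySem.Dict.empty "MEMORY_" (Or.inr (Or.inr rfl)), List.countP_eq_length_filter]
    simp
  unfold analyze_performance_considerations_py analyze_performance_considerations_py_alt
  rw [show (fun (d : PySem.Dict String Int) (n : List (String × String)) =>
        let t := (PySem.Dict.mk n).getD "type" ""
        pvRules.foldl (fun d r =>
          if PySem.Str.isIn r.1 t then d.insert r.1 (d.getD r.1 0 + 1) else d) d) = pvStep from rfl,
      show (fun n => PySem.Str.isIn "AI_" ((PySem.Dict.mk n).getD "type" "")) = pvP "AI_" from rfl,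
      show (fun n => PySem.Str.isIn "EXTERNAL_" ((PySem.Dict.mk n).getD "type" "")) = pvP "EXTERNAL_" from rfl,
      show (fun n => PySem.Str.isIn "MEMORY_" ((PySem.Dict.mk n).getD "type" "")) = pvP "MEMORY_" from rfl]
  simp only [pvRules, List.foldl, hA, hE, hM]
  split_ifs <;> first | rfl | omega

-- ===== VERDICT (by name: the statement is the Claim_ definition above) =====
theorem analyze_performance_considerations_py_spec : Claim_equal_analyze_performance_considerations_py := by
  intro nodes _
  exact analyze_performance_considerations_py_spec' nodes
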